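-- pv_equiv track=rewrite | github.com/shiranD/wordPromPred | src/begin3.py | syll_detector
-- ===== SOURCE A (Python) =====
-- def syll_detector(phns):
--     one = [];onekind = []
--     zero = []; zerokind = []
--     two = []; twokind = []
--     for phn in phns:
--         if '1' in phn:
--             one.append(phn)
--             onekind.append('1')
--         if '2' in phn:
--             two.append(phn)
--             twokind.append('2')
--         if '0' in phn:
--             zero.append(phn)
--             zerokind.append('3')
--
--     all_syll = one+two+zero
--     all_kinds = onekind+twokind+zerokind
--     return all_syll, len(all_syll), all_syll[0], all_kinds[0]
-- ===== SOURCE B (Python) =====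
-- def syll_detector(phns):
--     # tag each phoneme with (rank, phoneme, kind) for every marker digit it contains,
--     # then stable-sort the tags by rank so the 1-block precedes the 2-block precedes the 0-block
--     rank = {'1': (0, '1'), '2': (1, '2'), '0': (2, '3')}
--     tagged = [(rank[d][0], p, rank[d][1]) for p in phns for d in ('1', '2', '0') if d in p]
--     tagged.sort(key=lambda t: t[0])
--     all_syll = [p for _, p, _ in tagged]
--     return all_syll, len(all_syll), all_syll[0], tagged[0][2]
-- ===== Notes on version B (the rewrite author's own statement) =====
-- stated objective: alternative
-- what changed: B replaces A's single loop over six parallel accumulator lists by a tag-and-stable-sort pipeline: each phoneme is tagged once with a (rank, phoneme, kind) triple per marker digit it contains, the tags are stable-sorted by rank, and the result tuple is read off the sorted tag list.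
import Mathlib
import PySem

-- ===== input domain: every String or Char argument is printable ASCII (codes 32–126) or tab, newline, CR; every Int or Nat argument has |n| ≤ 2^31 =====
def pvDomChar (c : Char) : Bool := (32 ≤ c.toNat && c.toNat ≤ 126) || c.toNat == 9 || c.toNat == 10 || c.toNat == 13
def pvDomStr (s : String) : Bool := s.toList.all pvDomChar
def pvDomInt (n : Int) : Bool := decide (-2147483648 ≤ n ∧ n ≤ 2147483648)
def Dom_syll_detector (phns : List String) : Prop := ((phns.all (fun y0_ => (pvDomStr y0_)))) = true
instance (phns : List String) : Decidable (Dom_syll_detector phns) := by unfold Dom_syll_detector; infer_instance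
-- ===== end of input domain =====

-- B replaces the six-accumulator loop by tagging each phoneme once with a rank per
-- contained marker digit and stable-sorting the tags by rank (objective: alternative).

-- ===== PORT A =====
-- state: (one, onekind, two, twokind, zero, zerokind), appended exactly as A does
def syllALoop (phns : List String)
    (st : List String × List String × List String × List String × List String × List String) :
    List String × List String × List String × List String × List String × List String :=
  phns.foldl (fun st phn =>
    let (one, onekind, two, twokind, zero, zerokind) := st
    let (one, onekind) :=
      if PySem.Str.isIn "1" phn then (one ++ [phn], onekind ++ ["1"]) else (one, onekind)
    let (two, twokind) :=
      if PySem.Str.isIn "2" phn then (two ++ [phn], twokind ++ ["2"]) else (two, twokind)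
    let (zero, zerokind) :=
      if PySem.Str.isIn "0" phn then (zero ++ [phn], zerokind ++ ["3"]) else (zero, zerokind)
    (one, onekind, two, twokind, zero, zerokind)) st

def syll_detector (phns : List String) : List String × Int × String × String :=
  let (one, onekind, two, twokind, zero, zerokind) := syllALoop phns ([], [], [], [], [], [])
  let all_syll := one ++ two ++ zero
  let all_kinds := onekind ++ twokind ++ zerokind
  -- all_syll[0] / all_kinds[0] raise IndexError on []; excluded by Pre_
  (all_syll, (all_syll.length : Int),
   (PySem.List.pyGet? all_syll 0).getD "", (PySem.List.pyGet? all_kinds 0).getD "")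

-- ===== PORT B =====
-- rank : the dict {'1': (0,'1'), '2': (1,'2'), '0': (2,'3')} of Source B as a function
def syllRank (d : String) : Int × String :=
  if d = "1" then (0, "1") else if d = "2" then (1, "2") else (2, "3")

def syll_detector_alt (phns : List String) : List String × Int × String × String :=
  let tagged := phns.flatMap (fun p =>
    ((["1", "2", "0"].filter (fun d => PySem.Str.isIn d p)).map
      (fun d => ((syllRank d).1, p, (syllRank d).2))))
  let sortedT := PySem.List.sorted tagged (fun t => t.1) false
  let all_syll := sortedT.map (fun t => t.2.1)
  -- all_syll[0] / tagged[0] raise IndexError on []; excluded by Pre_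
  (all_syll, (all_syll.length : Int),
   (PySem.List.pyGet? all_syll 0).getD "",
   ((PySem.List.pyGet? sortedT 0).map (fun t => t.2.2)).getD "")

-- ===== PRECONDITION & SPEC =====
-- Pre_ excludes exactly the inputs where no phoneme contains '1', '2' or '0':
-- there all_syll is empty and A raises IndexError on all_syll[0].
def Pre_syll_detector (phns : List String) : Prop :=
  (phns.any (fun p => PySem.Str.isIn "1" p || PySem.Str.isIn "2" p || PySem.Str.isIn "0" p)) = true
instance (phns : List String) : Decidable (Pre_syll_detector phns) := by
  unfold Pre_syll_detector; infer_instance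

def pvWitness_syll_detector : List String := ["AA1", "B", "EH0"]

def Spec_syll_detector (phns : List String) (out : List String × Int × String × String) : Prop :=
  out = syll_detector_alt phns
instance (phns : List String) (out : List String × Int × String × String) :
    Decidable (Spec_syll_detector phns out) := by unfold Spec_syll_detector; infer_instance

-- ===== CLAIM (what is proved, stated in full; the proofs are below) =====
def Claim_equal_syll_detector : Prop :=
  ∀ (phns : List String), Dom_syll_detector phns → Pre_syll_detector phns →
    Spec_syll_detector phns (syll_detector phns)

-- ===== LEMMAS AND PROOFS =====
theorem syllALoop_eq (phns : List String) (one onekind two twokind zero zerokind : List String) :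
    syllALoop phns (one, onekind, two, twokind, zero, zerokind) =
      (one ++ phns.filter (fun p => PySem.Str.isIn "1" p),
       onekind ++ (phns.filter (fun p => PySem.Str.isIn "1" p)).map (fun _ => "1"),
       two ++ phns.filter (fun p => PySem.Str.isIn "2" p),
       twokind ++ (phns.filter (fun p => PySem.Str.isIn "2" p)).map (fun _ => "2"),
       zero ++ phns.filter (fun p => PySem.Str.isIn "0" p),
       zerokind ++ (phns.filter (fun p => PySem.Str.isIn "0" p)).map (fun _ => "3")) := by
  induction phns generalizing one onekind two twokind zero zerokind with
  | nil => simp [syllALoop]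
  | cons h t ih =>
    simp only [syllALoop, List.foldl_cons] at *
    split_ifs with h1 h2 h0 <;> simp_all

-- insertBy with a predicate false on every element of a prefix skips the prefix
theorem insertBy_skip {α : Type} (before : α → α → Bool) (x : α) (l r : List α)
    (h : ∀ y ∈ l, before x y = false) :
    PySem.List.insertBy before x (l ++ r) = l ++ PySem.List.insertBy before x r := by
  induction l with
  | nil => simp
  | cons a t ih =>
    have ha := h a (by simp)
    simp only [List.cons_append, PySem.List.insertBy, ha]
    simp only [Bool.false_eq_true, if_false]
    exact congrArg (a :: ·) (ih (fun y hy => h y (by simp [hy])))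

-- insertBy with a predicate true on every element conses in front (also when empty)
theorem insertBy_front {α : Type} (before : α → α → Bool) (x : α) (l : List α)
    (h : ∀ y ∈ l, before x y = true) :
    PySem.List.insertBy before x l = x :: l := by
  cases l with
  | nil => simp [PySem.List.insertBy]
  | cons a t => simp [PySem.List.insertBy, h a (by simp)]

-- insertBy with a predicate false everywhere appends at the end
theorem insertBy_last {α : Type} (before : α → α → Bool) (x : α) (l : List α)
    (h : ∀ y ∈ l, before x y = false) :
    PySem.List.insertBy before x l = l ++ [x] := by
  induction l with
  | nil => simp [PySem.List.insertBy]
  | cons a t ih =>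
    simp only [PySem.List.insertBy, h a (by simp), Bool.false_eq_true, if_false,
      List.cons_append]
    exact congrArg (a :: ·) (ih (fun y hy => h y (by simp [hy])))

-- the stable insertion-sort foldl on keys in {0,1,2} maintains three ordered blocks
theorem foldl_insertBy_blocks {β : Type} (xs : List (Int × β))
    (b0 b1 b2 : List (Int × β))
    (h0 : ∀ y ∈ b0, y.1 = 0) (h1 : ∀ y ∈ b1, y.1 = 1) (h2 : ∀ y ∈ b2, y.1 = 2)
    (hk : ∀ x ∈ xs, x.1 = 0 ∨ x.1 = 1 ∨ x.1 = 2) :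
    xs.foldl (fun acc x => PySem.List.insertBy (fun a b => decide (a.1 < b.1)) x acc)
        (b0 ++ b1 ++ b2) =
      (b0 ++ xs.filter (fun x => x.1 == 0)) ++ (b1 ++ xs.filter (fun x => x.1 == 1)) ++
      (b2 ++ xs.filter (fun x => x.1 == 2)) := by
  induction xs generalizing b0 b1 b2 with
  | nil => simp
  | cons x t ih =>
    simp only [List.foldl_cons]
    rcases hk x (by simp) with hx | hx | hx
    · have : PySem.List.insertBy (fun a b => decide (a.1 < b.1)) x (b0 ++ b1 ++ b2) =
          (b0 ++ [x]) ++ b1 ++ b2 := by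
        rw [List.append_assoc, insertBy_skip _ _ b0 _ (fun y hy => by simp [h0 y hy, hx]),
          insertBy_front _ _ _ (fun y hy => by
            rcases List.mem_append.mp hy with h | h
            · simp [h1 y h, hx]
            · simp [h2 y h, hx])]
        simp
      rw [this, ih (b0 ++ [x]) b1 b2
        (fun y hy => by rcases List.mem_append.mp hy with h | h
                        · exact h0 y h
                        · simp at h; simp [h, hx]) h1 h2 (fun y hy => hk y (by simp [hy]))]
      simp [hx]
    · have : PySem.List.insertBy (fun a b => decide (a.1 < b.1)) x (b0 ++ b1 ++ b2) =
          b0 ++ (b1 ++ [x]) ++ b2 := by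
        rw [List.append_assoc, insertBy_skip _ _ b0 _ (fun y hy => by simp [h0 y hy, hx]),
          insertBy_skip _ _ b1 _ (fun y hy => by simp [h1 y hy, hx]),
          insertBy_front _ _ _ (fun y hy => by simp [h2 y hy, hx])]
        simp
      rw [this, ih b0 (b1 ++ [x]) b2 h0
        (fun y hy => by rcases List.mem_append.mp hy with h | h
                        · exact h1 y h
                        · simp at h; simp [h, hx]) h2 (fun y hy => hk y (by simp [hy]))]
      simp [hx]
    · have : PySem.List.insertBy (fun a b => decide (a.1 < b.1)) x (b0 ++ b1 ++ b2) =
          b0 ++ b1 ++ (b2 ++ [x]) := by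
        rw [insertBy_skip _ _ (b0 ++ b1) _ (fun y hy => by
            rcases List.mem_append.mp hy with h | h
            · simp [h0 y h, hx]
            · simp [h1 y h, hx]),
          insertBy_last _ _ b2 (fun y hy => by simp [h2 y hy, hx])]
      rw [this, ih b0 b1 (b2 ++ [x]) h0 h1
        (fun y hy => by rcases List.mem_append.mp hy with h | h
                        · exact h2 y h
                        · simp at h; simp [h, hx]) (fun y hy => hk y (by simp [hy]))]
      simp [hx]

-- the tagged list of B, filtered by rank k, is the k-block of A
theorem tagged_filter (phns : List String) (k : Int) (d kind : String)
    (hd : (syllRank d).1 = k ∧ (syllRank d).2 = kind ∧ d ∈ (["1", "2", "0"] : List String))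
    (hk : ∀ e ∈ (["1", "2", "0"] : List String), (syllRank e).1 = k → e = d) :
    (phns.flatMap (fun p =>
        ((["1", "2", "0"].filter (fun e => PySem.Str.isIn e p)).map
          (fun e => ((syllRank e).1, p, (syllRank e).2))))).filter (fun x => x.1 == k) =
      (phns.filter (fun p => PySem.Str.isIn d p)).map (fun p => (k, p, kind)) := by
  obtain ⟨hdk, hdkind, hdm⟩ := hd
  induction phns with
  | nil => simp
  | cons p t ih =>
    simp only [List.flatMap_cons, List.filter_append, ih]
    have hinner : ((["1", "2", "0"].filter (fun e => PySem.Str.isIn e p)).map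
        (fun e => ((syllRank e).1, p, (syllRank e).2))).filter (fun x => x.1 == k) =
        if PySem.Str.isIn d p then [(k, p, kind)] else [] := by
      fin_cases hdm <;>
      · simp only [syllRank, if_pos rfl, reduceIte] at hdk hdkind
        subst hdk; subst hdkind
        by_cases a : PySem.Str.isIn "1" p <;> by_cases b : PySem.Str.isIn "2" p <;>
          by_cases c : PySem.Str.isIn "0" p <;>
          simp [syllRank, PySem.Str.isIn, PySem.Str.isIn, a, b, c] <;>
          simp [PySem.Str.isIn] at a b c <;> simp [a, b, c]
    rw [hinner]
    by_cases hp : PySem.Chars.isIn d.toList p.toList <;>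
      simp [PySem.Str.isIn, hp]

theorem pyGet?_zero {α : Type} (xs : List α) : PySem.List.pyGet? xs 0 = xs.head? := by
  cases xs <;> simp [PySem.List.pyGet?, PySem.List.pyIdx?]

-- ===== VERDICT (by name: the statement is the Claim_ definition above) =====
theorem syll_detector_spec : Claim_equal_syll_detector := by
  intro phns _ _
  unfold Spec_syll_detector syll_detector syll_detector_alt
  rw [syllALoop_eq]
  simp only [List.nil_append]
  set f1 := phns.filter (fun p => PySem.Str.isIn "1" p) with hf1
  set f2 := phns.filter (fun p => PySem.Str.isIn "2" p) with hf2
  set f0 := phns.filter (fun p => PySem.Str.isIn "0" p) with hf0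
  have hsorted : PySem.List.sorted (phns.flatMap (fun p =>
      ((["1", "2", "0"].filter (fun d => PySem.Str.isIn d p)).map
        (fun d => ((syllRank d).1, p, (syllRank d).2))))) (fun t => t.1) false =
      f1.map (fun p => ((0 : Int), p, "1")) ++ f2.map (fun p => ((1 : Int), p, "2")) ++
      f0.map (fun p => ((2 : Int), p, "3")) := by
    rw [PySem.List.sorted_eq_foldl_insertBy]
    have := foldl_insertBy_blocks (β := String × String)
      (phns.flatMap (fun p =>
        ((["1", "2", "0"].filter (fun d => PySem.Str.isIn d p)).map
          (fun d => ((syllRank d).1, p, (syllRank d).2))))) [] [] []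
      (by simp) (by simp) (by simp)
      (by intro x hx
          simp only [List.mem_flatMap, List.mem_map, List.mem_filter] at hx
          obtain ⟨p, _, d, hd, rfl⟩ := hx
          obtain ⟨hd1, _⟩ := hd
          fin_cases hd1 <;> simp [syllRank])
    simp only [List.nil_append] at this
    rw [this,
      tagged_filter phns 0 "1" "1" (by refine ⟨?_, ?_, ?_⟩ <;> simp [syllRank])
        (by decide),
      tagged_filter phns 1 "2" "2" (by refine ⟨?_, ?_, ?_⟩ <;> simp [syllRank])
        (by decide),
      tagged_filter phns 2 "0" "3" (by refine ⟨?_, ?_, ?_⟩ <;> simp [syllRank])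
        (by decide)]
  simp only [hsorted, Prod.mk.injEq]
  refine ⟨?_, ?_, ?_, ?_⟩
  · simp [Function.comp_def]
  · simp
  · rw [pyGet?_zero, pyGet?_zero]
    simp [List.map_append, List.map_map, Function.comp_def]
  · rw [pyGet?_zero, pyGet?_zero, ← List.head?_map]
    simp [List.map_append, List.map_map, Function.comp_def]
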